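/- GENERATED by c/gen_decode.py: decode facts of the image, one per distinct instruction byte string. -/
import UserX.DecodeImage

#decode_all Vorbis.Dec
  "019d84000000"  -- add DWORD PTR [rbp+0x84],ebx
  "0f80fafeffff"  -- jo 114f19
  "0f84b6000000"  -- je 10d6ac
  "0f85d0020000"  -- jne 10df5f
  "0f8e22fdffff"  -- jle 110c5d
  "0fb6431b"  -- movzx eax,BYTE PTR [rbx+0x1b]
  "29c8"  -- sub eax,ecx
  "400fb6ed"  -- movzx ebp,bpl
  "410fb7c4"  -- movzx eax,r12w
  "4183c602"  -- add r14d,0x2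
  "4189d4"  -- mov r12d,edx
  "41b901000000"  -- mov r9d,0x1
  "420fb6442321"  -- movzx eax,BYTE PTR [rbx+r12*1+0x21]
  "4429e3"  -- sub ebx,r12d
  "44892424"  -- mov DWORD PTR [rsp],r12d
  "4489b338060000"  -- mov DWORD PTR [rbx+0x638],r14d
  "448b6d80"  -- mov r13d,DWORD PTR [rbp-0x80]
  "450faf3424"  -- imul r14d,DWORD PTR [r12]
  "45897c2404"  -- mov DWORD PTR [r12+0x4],r15d
  "460fb7646500"  -- movzx r12d,WORD PTR [rbp+r12*2+0x0]
  "4839c3"  -- cmp rbx,rax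
  "4869ed48080000"  -- imul rbp,rbp,0x848
  "4883ec18"  -- sub rsp,0x18
  "48897dc8"  -- mov QWORD PTR [rbp-0x38],rdi
  "488b4598"  -- mov rax,QWORD PTR [rbp-0x68]
  "488b9d50ffffff"  -- mov rbx,QWORD PTR [rbp-0xb0]
  "488d5c30f0"  -- lea rbx,[rax+rsi*1-0x10]
  "488d7d1b"  -- lea rdi,[rbp+0x1b]
  "488dbb80000000"  -- lea rdi,[rbx+0x80]
  "488dbda8000000"  -- lea rdi,[rbp+0xa8]
  "48c7442428e00e1200"  -- mov QWORD PTR [rsp+0x28],0x120ee0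
  "4903b424a8000000"  -- add rsi,QWORD PTR [r12+0xa8]
  "49896e28"  -- mov QWORD PTR [r14+0x28],rbp
  "498d7c2402"  -- lea rdi,[r12+0x2]
  "498dbcc568030000"  -- lea rdi,[r13+rax*8+0x368]
  "4a8d3c63"  -- lea rdi,[rbx+r12*2]
  "4c036d28"  -- add r13,QWORD PTR [rbp+0x28]
  "4c8975c0"  -- mov QWORD PTR [rbp-0x40],r14
  "4c8b6dc8"  -- mov r13,QWORD PTR [rbp-0x38]
  "4c8d742420"  -- lea r14,[rsp+0x20]
  "4d89e5"  -- mov r13,r12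
  "4f8d242f"  -- lea r12,[r15+r13*1]
  "6639c5"  -- cmp bp,ax
  "6645896c2402"  -- mov WORD PTR [r12+0x2],r13w
  "7408"  -- je 114688
  "749d"  -- je 10d47e
  "760d"  -- jbe 1023b9
  "7d45"  -- jge 1022a4
  "7f44"  -- jg 1041be
  "81ffffffff00"  -- cmp edi,0xffffff
  "83f818"  -- cmp eax,0x18
  "8955a0"  -- mov DWORD PTR [rbp-0x60],edx
  "89c9"  -- mov ecx,ecx
  "8b4c241c"  -- mov ecx,DWORD PTR [rsp+0x1c]
  "8b8538ffffff"  -- mov eax,DWORD PTR [rbp-0xc8]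
  "8d8102fcffff"  -- lea eax,[rcx-0x3fe]
  "c1c010"  -- rol eax,0x10
  "c7455000000000"  -- mov DWORD PTR [rbp+0x50],0x0
  "c78560ffffff00000000"  -- mov DWORD PTR [rbp-0xa0],0x0
  "e807c1ffff"  -- call 100300
  "e8117dffff"  -- call 10d1c0
  "e81b26ffff"  -- call 100480
  "e824f3feff"  -- call 103d00
  "e82d9fffff"  -- call 100640
  "e837b5feff"  -- call 100800
  "e84319ffff"  -- call 100640
  "e84d83ffff"  -- call 100640
  "e857fdffff"  -- call 104c60
  "e866340000"  -- call 1034a0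
  "e8711effff"  -- call 100640
  "e87b76ffff"  -- call 10d1c0
  "e887afffff"  -- call 107500
  "e890d8feff"  -- call 100640
  "e89aeffeff"  -- call 100480
  "e8a5f1feff"  -- call 1003c0
  "e8affeffff"  -- call 101200
  "e8b9a5feff"  -- call 100640
  "e8c436ffff"  -- call 100720
  "e8cd8dffff"  -- call 100800
  "e8d866ffff"  -- call 100640
  "e8e1abffff"  -- call 100640
  "e8eb92ffff"  -- call 100800
  "e8f31cffff"  -- call 104c60
  "e8fe30ffff"  -- call 100800
  "e93dfeffff"  -- jmp 10f914
  "e98a030000"  -- jmp 105af9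
  "e9dff5ffff"  -- jmp 10eef0
  "eb4e"  -- jmp 10d4cc
  "ebce"  -- jmp 108341
  "f20f2ad5"  -- cvtsi2sd xmm2,ebp
  "f20f5cc0"  -- subsd xmm0,xmm0
  "f30f1045bc"  -- movss xmm0,DWORD PTR [rbp-0x44]
  "f30f106c2410"  -- movss xmm5,DWORD PTR [rsp+0x10]
  "f30f114bf0"  -- movss DWORD PTR [rbx-0x10],xmm1
  "f30f116c2410"  -- movss DWORD PTR [rsp+0x10],xmm5
  "f30f585c2414"  -- addss xmm3,DWORD PTR [rsp+0x14]
  "f30f59c5"  -- mulss xmm0,xmm5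
  "f30f5cf1"  -- subss xmm6,xmm1
  "f3410f115f0c"  -- movss DWORD PTR [r15+0xc],xmm3
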